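-- pv_equiv track=rewrite | github.com/HenriqueProj/CSP_Test_Scheduling | proj.py | modify_m_array
-- ===== SOURCE A (Python) =====
-- def modify_m_array(m):
--     for i in range(len(m[0])):
--         machine_sum = sum(m[j][i] for j in range(len(m)))
--         if machine_sum == 1:
--             for j in range(len(m)):
--                 if m[j][i] == 1:
--                     m[j][i] = 2
--     return m
-- ===== SOURCE B (Python) =====
-- def modify_m_array(m):
--     width = len(m[0])
--     cols = [[row[i] for row in m] for i in range(width)]
--     fixed = [[2 if v == 1 else v for v in col] if sum(col) == 1 else col
--              for col in cols]
--     for i, col in enumerate(fixed):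
--         for row, v in zip(m, col):
--             row[i] = v
--     return m
-- ===== Notes on version B (the rewrite author's own statement) =====
-- stated objective: alternative
-- what changed: Replaces A's in-place sequential per-column mutation (sum pass then rescan-and-rewrite pass inside the loop) by a staged functional pipeline: transpose the matrix into columns, fix each column independently as a pure transformation, then write all columns back in one final phase.
import Mathlib
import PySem

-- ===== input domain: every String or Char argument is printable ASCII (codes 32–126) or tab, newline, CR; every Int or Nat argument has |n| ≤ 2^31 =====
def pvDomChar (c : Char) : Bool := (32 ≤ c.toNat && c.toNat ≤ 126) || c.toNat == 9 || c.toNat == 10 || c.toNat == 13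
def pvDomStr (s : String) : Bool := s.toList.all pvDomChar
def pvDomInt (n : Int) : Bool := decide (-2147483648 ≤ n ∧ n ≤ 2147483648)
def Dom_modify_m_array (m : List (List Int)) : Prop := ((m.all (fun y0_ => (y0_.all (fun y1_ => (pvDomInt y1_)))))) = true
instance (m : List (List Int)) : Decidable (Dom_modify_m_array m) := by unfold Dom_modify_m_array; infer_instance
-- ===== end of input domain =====

-- B replaces A's in-place sequential per-column mutation by a staged pipeline (transpose,
-- fix each column purely, write all columns back); both Pythons mutate m in place and end
-- with identical contents, the theorems are about the return value.

-- ===== PORT A =====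
-- for each column i: sum the column, and if the sum is 1 rewrite every 1-entry of that column to 2
def modify_m_array (m : List (List Int)) : List (List Int) :=
  (List.range (m.headD []).length).foldl
    (fun acc i =>
      let machine_sum := acc.foldl (fun t row => t + row.getD i 0) 0
      if machine_sum = 1 then
        acc.map (fun row => if row.getD i 0 = 1 then row.set i 2 else row)
      else acc)
    m

-- ===== PORT B =====
-- transpose into columns, fix each column independently (pure), write the columns back
-- (Python's `for i, col in enumerate(fixed)` is ported as a fold over (range).zip fixed:
-- the indices are the nonnegative positions, so Nat indices are exact here)
def modify_m_array_alt (m : List (List Int)) : List (List Int) :=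
  let width := (m.headD []).length
  let cols := (List.range width).map (fun i => m.map (fun row => row.getD i 0))
  let fixed := cols.map (fun col =>
    if col.foldl (· + ·) 0 = 1 then col.map (fun v => if v = (1 : Int) then 2 else v) else col)
  ((List.range fixed.length).zip fixed).foldl
    (fun acc p => (acc.zip p.2).map (fun q => q.1.set p.1 q.2))
    m

-- ===== PRECONDITION & SPEC =====
-- Pre_ excludes exactly the inputs where Python A raises IndexError: an empty matrix (m[0]),
-- or a row shorter than the first row (m[j][i]).
def Pre_modify_m_array (m : List (List Int)) : Prop :=
  m ≠ [] ∧ ∀ row ∈ m, (m.headD []).length ≤ row.length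
instance (m : List (List Int)) : Decidable (Pre_modify_m_array m) := by
  unfold Pre_modify_m_array; infer_instance
def pvWitness_modify_m_array : List (List Int) := [[1, 0], [0, 1], [0, 1]]
def Spec_modify_m_array (m : List (List Int)) (out : List (List Int)) : Prop := out = modify_m_array_alt m
instance (m : List (List Int)) (out : List (List Int)) : Decidable (Spec_modify_m_array m out) := by unfold Spec_modify_m_array; infer_instance

-- ===== CLAIM (what is proved, stated in full; the proofs are below) =====
def Claim_equal_modify_m_array : Prop := ∀ (m : List (List Int)), Dom_modify_m_array m → Pre_modify_m_array m → Spec_modify_m_array m (modify_m_array m)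

-- ===== LEMMAS AND PROOFS =====

-- writing back the value already there is a no-op (in range and out of range alike)
theorem pv_set_getD_self (r : List Int) (i : Nat) : r.set i (r.getD i 0) = r := by
  induction r generalizing i with
  | nil => rfl
  | cons a t ih =>
    cases i with
    | zero => simp [List.set, List.getD]
    | succ k =>
      simp only [List.set]
      rw [show ((a :: t).getD (k + 1) 0) = t.getD k 0 from rfl, ih]

-- setting index i does not change what getD reads at another index
theorem pv_getD_set_ne (r : List Int) (i j : Nat) (v : Int) (h : j ≠ i) :
    (r.set i v).getD j 0 = r.getD j 0 := by
  unfold List.getD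
  rw [List.getElem?_set_ne (fun e => h e.symm)]

-- zipping a list with its own image and mapping is a single map
theorem pv_zip_map_self {α β γ : Type} (xs : List α) (g : α → β) (k : α × β → γ) :
    (xs.zip (xs.map g)).map k = xs.map (fun x => k (x, g x)) := by
  induction xs with
  | nil => rfl
  | cons a t ih => simp [ih]

-- pairing range with its image for the fold over enumerate(fixed)
theorem pv_zip_map_range {β : Type} (n : Nat) (g : Nat → β) :
    (List.range n).zip ((List.range n).map g)
      = (List.range n).map (fun i => (i, g i)) := by
  have h := pv_zip_map_self (List.range n) g (fun p => p)
  simpa using h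

-- B as a fold over column indices of the pure per-column write-back
theorem pv_alt_as_fold (m : List (List Int)) :
    modify_m_array_alt m
      = (List.range (m.headD []).length).foldl
          (fun acc i =>
            let col := m.map (fun row => row.getD i 0)
            let fcol := if col.foldl (· + ·) 0 = 1
              then col.map (fun v => if v = (1 : Int) then 2 else v) else col
            (acc.zip fcol).map (fun q => q.1.set i q.2))
          m := by
  unfold modify_m_array_alt
  simp only [List.length_map, List.length_range, List.map_map, pv_zip_map_range,
    List.foldl_map, Function.comp]

-- the two per-column steps agree on every intermediate matrix whose column i is m's column i
theorem pv_step (m acc : List (List Int)) (i : Nat)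
    (hcol : acc.map (fun row => row.getD i 0) = m.map (fun row => row.getD i 0)) :
    (let machine_sum := acc.foldl (fun t row => t + row.getD i 0) 0
     if machine_sum = 1 then
       acc.map (fun row => if row.getD i 0 = 1 then row.set i 2 else row)
     else acc)
    = (let col := m.map (fun row => row.getD i 0)
       let fcol := if col.foldl (· + ·) 0 = 1
         then col.map (fun v => if v = (1 : Int) then 2 else v) else col
       (acc.zip fcol).map (fun q => q.1.set i q.2)) := by
  have hsum : acc.foldl (fun t row => t + row.getD i 0) 0
      = (m.map (fun row => row.getD i 0)).foldl (· + ·) 0 := by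
    rw [← hcol, List.foldl_map]
  simp only [← hcol, hsum]
  by_cases h : (acc.map (fun row => row.getD i 0)).foldl (· + ·) 0 = 1
  · rw [if_pos h, if_pos h, List.map_map, pv_zip_map_self]
    refine List.map_congr_left (fun r _ => ?_)
    show (if r.getD i 0 = 1 then r.set i 2 else r)
        = r.set i (if r.getD i 0 = 1 then 2 else r.getD i 0)
    by_cases h1 : r.getD i 0 = 1
    · rw [if_pos h1, if_pos h1]
    · rw [if_neg h1, if_neg h1, pv_set_getD_self]
  · rw [if_neg h, if_neg h, pv_zip_map_self]
    have : ∀ r ∈ acc, r.set i (r.getD i 0) = r := fun r _ => pv_set_getD_self r i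
    rw [List.map_congr_left this, List.map_id']

-- A's per-column step only writes index i of rows, so every other column is untouched
theorem pv_col_preserved (acc : List (List Int)) (i j : Nat) (hji : j ≠ i) :
    ((let machine_sum := acc.foldl (fun t row => t + row.getD i 0) 0
      if machine_sum = 1 then
        acc.map (fun row => if row.getD i 0 = 1 then row.set i 2 else row)
      else acc).map (fun row => row.getD j 0))
    = acc.map (fun row => row.getD j 0) := by
  by_cases h : acc.foldl (fun t row => t + row.getD i 0) 0 = 1
  · simp only [if_pos h, List.map_map]
    refine List.map_congr_left (fun r _ => ?_)
    show (if r.getD i 0 = 1 then r.set i 2 else r).getD j 0 = r.getD j 0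
    by_cases h1 : r.getD i 0 = 1
    · rw [if_pos h1, pv_getD_set_ne r i j 2 hji]
    · rw [if_neg h1]
  · simp only [if_neg h]

-- folds over distinct column indices agree as long as untouched columns still match m
theorem pv_fold (m : List (List Int)) (l : List Nat) (hnd : l.Nodup) :
    ∀ (acc : List (List Int)),
      (∀ i ∈ l, acc.map (fun row => row.getD i 0) = m.map (fun row => row.getD i 0)) →
    l.foldl
      (fun acc i =>
        let machine_sum := acc.foldl (fun t row => t + row.getD i 0) 0
        if machine_sum = 1 then
          acc.map (fun row => if row.getD i 0 = 1 then row.set i 2 else row)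
        else acc) acc
    = l.foldl
      (fun acc i =>
        let col := m.map (fun row => row.getD i 0)
        let fcol := if col.foldl (· + ·) 0 = 1
          then col.map (fun v => if v = (1 : Int) then 2 else v) else col
        (acc.zip fcol).map (fun q => q.1.set i q.2)) acc := by
  induction l with
  | nil => intro acc _; rfl
  | cons i t ih =>
    intro acc hinv
    have hit : i ∉ t := (List.nodup_cons.mp hnd).1
    have hndt : t.Nodup := (List.nodup_cons.mp hnd).2
    have hcol := hinv i (List.mem_cons_self)
    rw [List.foldl_cons, List.foldl_cons, ← pv_step m acc i hcol]
    refine ih hndt _ (fun j hj => ?_)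
    have hji : j ≠ i := fun e => hit (e ▸ hj)
    rw [pv_col_preserved acc i j hji]
    exact hinv j (List.mem_cons_of_mem i hj)

-- ===== VERDICT (by name: the statement is the Claim_ definition above) =====
theorem modify_m_array_spec : Claim_equal_modify_m_array := by
  intro m _ _
  show modify_m_array m = modify_m_array_alt m
  rw [pv_alt_as_fold]
  exact pv_fold m _ (List.nodup_range) m (fun _ _ => rfl)
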